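-- pv_equiv track=rewrite | github.com/eyasar23/Avengers-Airline-Seating-Algorithm | q2a.py | can_board_with_preference
-- ===== SOURCE A (Python) =====
-- def can_board_with_preference(total_avengers: int, seat_config: str, preference: str) -> str:
--     empty = "O"
--     occupied ="X"
--     aisle= "|"
--     char = empty + occupied + aisle
--     emp = seat_config.count(empty)
--
--     for u in seat_config:
--         if u not in char:
--            return'Invalid seat letters!'
--
--
--
--     if  len(seat_config) == 6 :
--         if    preference == "W" :
--               if [seat_config[0] , seat_config[-1]].count('O') >= total_avengers :
--                   return 'Yes, you may board!'
--               else :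
--                    return 'Boarding Denied!'
--
--         elif  preference == "M":
--               return  'Invalid seat preference!'
--         elif  preference == "A":
--               if [seat_config[0],seat_config[2],seat_config[3],seat_config[5]].count('O') >= total_avengers :
--                  return 'Yes, you may board!'
--               else :
--                   return 'Boarding Denied!'
--
--
--         elif  preference == "D":
--               if [seat_config[0],seat_config[2],seat_config[3],seat_config[5]].count('O') >= total_avengers :
--                  return 'Yes, you may board!'
--               else :
--                   return 'Boarding Denied!'
--         else :
--             return 'Invalid seat preference!'
--
--
--     elif len(seat_config) == 12:
--          if    preference == "W":
--                if [seat_config[0] , seat_config[-1]].count('O') >= total_avengers :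
--                    return 'Yes, you may board!'
--                else :
--                     return 'Boarding Denied!'
--
--
--
--          elif  preference == "M":
--                if [seat_config[1],seat_config[5],seat_config[6],seat_config[10]].count('O') >= total_avengers :
--                    return 'Yes, you may board!'
--                else :
--                     return 'Boarding Denied!'
--          elif  preference == "A":
--                if [seat_config[2],seat_config[4],seat_config[7],seat_config[9]].count('O') >= total_avengers :
--                    return 'Yes, you may board!'
--                else :
--                     return 'Boarding Denied!'
--          elif  preference == "D":
--                if [seat_config[2],seat_config[4],seat_config[7],seat_config[9]].count('O') >= total_avengers :
--                    return 'Yes, you may board!'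
--                else :
--                     return 'Boarding Denied!'
--          else :
--              return 'Invalid seat preference!'
--
--
--     elif len(seat_config) == 8:
--          if    preference == "W":
--                if [seat_config[0] , seat_config[-1]].count('0') >= total_avengers :
--                    return 'Yes, you may board!'
--                else :
--                     return 'Boarding Denied!'
--          elif  preference == "M":
--                return  'Invalid seat preference!'
--          elif  preference == "A":
--                if [seat_config[1],seat_config[3],seat_config[4],seat_config[6]].count('O') >= total_avengers :
--                    return 'Yes, you may board!'
--                else :
--                     return 'Boarding Denied!'
--
--
--          elif  preference == "D":
--               if [seat_config[1],seat_config[3],seat_config[4],seat_config[6]].count('O') >= total_avengers :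
--                   return 'Yes, you may board!'
--               else :
--                    return 'Boarding Denied!'
--          else :
--              return 'Invalid seat preference!'
--
--     else:
--          return 'Invalid seat configuration!'
-- ===== SOURCE B (Python) =====
-- # Preferred seats are characterised by their "depth" min(i, n-1-i) from the nearer end of
-- # the row, so one fused pass validates letters and counts free preferred seats at once.
-- _SEAT_DEPTHS = {
--     (6, "W"): (0,), (6, "A"): (0, 2), (6, "D"): (0, 2),
--     (12, "W"): (0,), (12, "M"): (1, 5), (12, "A"): (2, 4), (12, "D"): (2, 4),
--     (8, "W"): (0,), (8, "A"): (1, 3), (8, "D"): (1, 3),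
-- }
--
-- def can_board_with_preference(total_avengers: int, seat_config: str, preference: str) -> str:
--     n = len(seat_config)
--     depths = _SEAT_DEPTHS.get((n, preference), ())
--     count = 0
--     for i, u in enumerate(seat_config):
--         if u not in "OX|":
--             return 'Invalid seat letters!'
--         if u == 'O' and min(i, n - 1 - i) in depths:
--             count += 1
--     if n not in (6, 12, 8):
--         return 'Invalid seat configuration!'
--     if (n, preference) not in _SEAT_DEPTHS:
--         return 'Invalid seat preference!'
--     return 'Yes, you may board!' if count >= total_avengers else 'Boarding Denied!'
-- ===== Notes on version B (the rewrite author's own statement) =====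
-- stated objective: alternative
-- what changed: Replaced A's staged validation loop plus three copy-pasted per-length index-list branches by a single fused pass over enumerate(seat_config) that validates each character and counts free preferred seats via the symmetric seat depth min(i, n-1-i), so no seat is ever indexed directly.
-- intended difference: On valid length-8 configs with preference 'W' and 1 <= total_avengers <= number of free window seats, A returns 'Boarding Denied!' because it counts the digit '0' (which never occurs in a valid config) instead of the seat letter 'O', while B counts 'O' and returns 'Yes, you may board!', which is clearly the intended behaviour. — e.g. on can_board_with_preference(1, "OX|X|X|O", "W"): A returns "Boarding Denied!", B returns "Yes, you may board!"
import Mathlib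
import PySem

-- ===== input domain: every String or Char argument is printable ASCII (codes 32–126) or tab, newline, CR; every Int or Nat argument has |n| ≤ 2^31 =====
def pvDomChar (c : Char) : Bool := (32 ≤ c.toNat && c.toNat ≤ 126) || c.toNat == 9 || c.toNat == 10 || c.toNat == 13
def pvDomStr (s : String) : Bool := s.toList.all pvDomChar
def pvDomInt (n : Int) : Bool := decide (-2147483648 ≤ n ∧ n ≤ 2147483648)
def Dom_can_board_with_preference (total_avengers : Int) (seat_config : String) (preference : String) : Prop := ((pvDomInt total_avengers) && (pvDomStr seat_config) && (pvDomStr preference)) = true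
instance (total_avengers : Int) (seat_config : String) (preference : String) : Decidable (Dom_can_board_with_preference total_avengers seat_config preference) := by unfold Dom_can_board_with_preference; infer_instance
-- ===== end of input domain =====

-- B fuses A's validation loop and its three copy-pasted per-length index-list ladders into one
-- enumerate pass counting free preferred seats by their symmetric depth min(i, n-1-i); it also
-- fixes A's digit-'0' vs letter-'O' slip in the length-8 window branch (D_ below).

-- ===== PORT A =====

/-- A's `for u in seat_config: if u not in char: return …` early-return loop:
    `true` iff some character outside "OX|" is met. -/
def pvA_badLoop : List Char → Bool
  | [] => false
  | u :: rest => if !(['O', 'X', '|'].contains u) then true else pvA_badLoop rest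

/-- A's body over the character list of `seat_config` (the if-elif ladders, branch for branch). -/
def pvA_core (total_avengers : Int) (cs : List Char) (preference : String) : String :=
  if pvA_badLoop cs then "Invalid seat letters!"
  else if cs.length = 6 then
    if preference = "W" then
      if (([PySem.List.pyGet? cs 0, PySem.List.pyGet? cs (-1)].count (some 'O') : Nat) : Int) ≥ total_avengers then "Yes, you may board!" else "Boarding Denied!"
    else if preference = "M" then "Invalid seat preference!"
    else if preference = "A" then
      if (([PySem.List.pyGet? cs 0, PySem.List.pyGet? cs 2, PySem.List.pyGet? cs 3, PySem.List.pyGet? cs 5].count (some 'O') : Nat) : Int) ≥ total_avengers then "Yes, you may board!" else "Boarding Denied!"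
    else if preference = "D" then
      if (([PySem.List.pyGet? cs 0, PySem.List.pyGet? cs 2, PySem.List.pyGet? cs 3, PySem.List.pyGet? cs 5].count (some 'O') : Nat) : Int) ≥ total_avengers then "Yes, you may board!" else "Boarding Denied!"
    else "Invalid seat preference!"
  else if cs.length = 12 then
    if preference = "W" then
      if (([PySem.List.pyGet? cs 0, PySem.List.pyGet? cs (-1)].count (some 'O') : Nat) : Int) ≥ total_avengers then "Yes, you may board!" else "Boarding Denied!"
    else if preference = "M" then
      if (([PySem.List.pyGet? cs 1, PySem.List.pyGet? cs 5, PySem.List.pyGet? cs 6, PySem.List.pyGet? cs 10].count (some 'O') : Nat) : Int) ≥ total_avengers then "Yes, you may board!" else "Boarding Denied!"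
    else if preference = "A" then
      if (([PySem.List.pyGet? cs 2, PySem.List.pyGet? cs 4, PySem.List.pyGet? cs 7, PySem.List.pyGet? cs 9].count (some 'O') : Nat) : Int) ≥ total_avengers then "Yes, you may board!" else "Boarding Denied!"
    else if preference = "D" then
      if (([PySem.List.pyGet? cs 2, PySem.List.pyGet? cs 4, PySem.List.pyGet? cs 7, PySem.List.pyGet? cs 9].count (some 'O') : Nat) : Int) ≥ total_avengers then "Yes, you may board!" else "Boarding Denied!"
    else "Invalid seat preference!"
  else if cs.length = 8 then
    if preference = "W" then
      if (([PySem.List.pyGet? cs 0, PySem.List.pyGet? cs (-1)].count (some '0') : Nat) : Int) ≥ total_avengers then "Yes, you may board!" else "Boarding Denied!"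
    else if preference = "M" then "Invalid seat preference!"
    else if preference = "A" then
      if (([PySem.List.pyGet? cs 1, PySem.List.pyGet? cs 3, PySem.List.pyGet? cs 4, PySem.List.pyGet? cs 6].count (some 'O') : Nat) : Int) ≥ total_avengers then "Yes, you may board!" else "Boarding Denied!"
    else if preference = "D" then
      if (([PySem.List.pyGet? cs 1, PySem.List.pyGet? cs 3, PySem.List.pyGet? cs 4, PySem.List.pyGet? cs 6].count (some 'O') : Nat) : Int) ≥ total_avengers then "Yes, you may board!" else "Boarding Denied!"
    else "Invalid seat preference!"
  else "Invalid seat configuration!"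

def can_board_with_preference (total_avengers : Int) (seat_config : String) (preference : String) : String :=
  pvA_core total_avengers seat_config.toList preference

-- ===== PORT B =====

/-- B's `_SEAT_DEPTHS` table: (row length, preference) ↦ allowed seat depths min(i, n-1-i). -/
def pvB_depths : PySem.Dict (Int × String) (List Int) :=
  PySem.Dict.ofList
    [ ((6, "W"), [0]),  ((6, "A"), [0, 2]),  ((6, "D"), [0, 2]),
      ((12, "W"), [0]), ((12, "M"), [1, 5]), ((12, "A"), [2, 4]), ((12, "D"), [2, 4]),
      ((8, "W"), [0]),  ((8, "A"), [1, 3]),  ((8, "D"), [1, 3]) ]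

/-- B's `for i, u in enumerate(seat_config)` loop: early return (`none`) on a bad letter,
    otherwise the running count of free seats whose depth is in `depths`.
    (`u not in "OX|"` for a single char is exactly list membership in "OX|".toList.) -/
def pvB_loop (depths : List Int) (n : Int) : List (Int × Char) → Int → Option Int
  | [], count => some count
  | (i, u) :: rest, count =>
    if !("OX|".toList.contains u) then none
    else pvB_loop depths n rest (count + if u = 'O' ∧ min i (n - 1 - i) ∈ depths then 1 else 0)

/-- B's body over the character list of `seat_config`. -/
def pvB_core (total_avengers : Int) (cs : List Char) (preference : String) : String :=
  let n : Int := (cs.length : Int)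
  let depths := (pvB_depths.get? (n, preference)).getD []
  match pvB_loop depths n (PySem.List.enumerate cs) 0 with
  | none => "Invalid seat letters!"
  | some count =>
    if ¬(n = 6 ∨ n = 12 ∨ n = 8) then "Invalid seat configuration!"
    else if ¬(pvB_depths.contains (n, preference) = true) then "Invalid seat preference!"
    else if count ≥ total_avengers then "Yes, you may board!" else "Boarding Denied!"

def can_board_with_preference_alt (total_avengers : Int) (seat_config : String) (preference : String) : String :=
  pvB_core total_avengers seat_config.toList preference

-- ===== PRECONDITION & SPEC =====

-- On valid length-8 configs with preference "W" and 1 ≤ total_avengers ≤ (number of free window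
-- seats), A returns 'Boarding Denied!' because it counts the digit '0' (which never occurs in a
-- valid config) instead of the seat letter 'O', while B counts 'O' and returns
-- 'Yes, you may board!', which is clearly the intended behaviour.
def D_can_board_with_preference (total_avengers : Int) (seat_config : String) (preference : String) : Prop :=
  (seat_config.toList.all (fun c => c == 'O' || c == 'X' || c == '|')) = true ∧
  seat_config.toList.length = 8 ∧ preference = "W" ∧
  1 ≤ total_avengers ∧
  total_avengers ≤ ((seat_config.toList.take 1 ++ seat_config.toList.drop 7).count 'O' : Int)

instance (total_avengers : Int) (seat_config : String) (preference : String) : Decidable (D_can_board_with_preference total_avengers seat_config preference) := by unfold D_can_board_with_preference; infer_instance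

def Spec_can_board_with_preference (total_avengers : Int) (seat_config : String) (preference : String) (out : String) : Prop := ¬ D_can_board_with_preference total_avengers seat_config preference → out = can_board_with_preference_alt total_avengers seat_config preference
instance (total_avengers : Int) (seat_config : String) (preference : String) (out : String) : Decidable (Spec_can_board_with_preference total_avengers seat_config preference out) := by unfold Spec_can_board_with_preference; infer_instance

def pvDiffWitness_can_board_with_preference : Int × String × String := (1, "OX|X|X|O", "W")
def pvDiffWitnessOut_can_board_with_preference : String × String := ("Boarding Denied!", "Yes, you may board!")

-- ===== CLAIM (what is proved, stated in full; the proofs are below) =====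
def Claim_unchanged_can_board_with_preference : Prop := ∀ (total_avengers : Int) (seat_config : String) (preference : String), Dom_can_board_with_preference total_avengers seat_config preference → Spec_can_board_with_preference total_avengers seat_config preference (can_board_with_preference total_avengers seat_config preference)
def Claim_changed_can_board_with_preference : Prop := Dom_can_board_with_preference (pvDiffWitness_can_board_with_preference.1) (pvDiffWitness_can_board_with_preference.2.1) (pvDiffWitness_can_board_with_preference.2.2) ∧ D_can_board_with_preference (pvDiffWitness_can_board_with_preference.1) (pvDiffWitness_can_board_with_preference.2.1) (pvDiffWitness_can_board_with_preference.2.2) ∧ can_board_with_preference (pvDiffWitness_can_board_with_preference.1) (pvDiffWitness_can_board_with_preference.2.1) (pvDiffWitness_can_board_with_preference.2.2) = pvDiffWitnessOut_can_board_with_preference.1 ∧ can_board_with_preference_alt (pvDiffWitness_can_board_with_preference.1) (pvDiffWitness_can_board_with_preference.2.1) (pvDiffWitness_can_board_with_preference.2.2) = pvDiffWitnessOut_can_board_with_preference.2 ∧ pvDiffWitnessOut_can_board_with_preference.1 ≠ pvDiffWitnessOut_can_board_with_preference.2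
def Claim_exact_can_board_with_preference : Prop := ∀ (total_avengers : Int) (seat_config : String) (preference : String), Dom_can_board_with_preference total_avengers seat_config preference → D_can_board_with_preference total_avengers seat_config preference → can_board_with_preference total_avengers seat_config preference ≠ can_board_with_preference_alt total_avengers seat_config preference

-- ===== LEMMAS AND PROOFS =====

theorem pvA_badLoop_eq_any (cs : List Char) :
    pvA_badLoop cs = cs.any (fun c => !(['O', 'X', '|'].contains c)) := by
  induction cs with
  | nil => rfl
  | cons u rest ih =>
    simp only [pvA_badLoop, List.any_cons]
    by_cases h : (['O', 'X', '|'].contains u) = true <;> simp [ih]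

theorem pvB_loop_bad (depths : List Int) (n : Int) :
    ∀ (l : List (Int × Char)) (acc : Int),
      (l.any (fun q => !("OX|".toList.contains q.2))) = true → pvB_loop depths n l acc = none := by
  intro l
  induction l with
  | nil => simp
  | cons q rest ih =>
    intro acc h
    obtain ⟨i, u⟩ := q
    by_cases hb : ("OX|".toList.contains u) = true
    · have h' : (rest.any (fun q => !("OX|".toList.contains q.2))) = true := by
        simp only [List.any_cons, Bool.or_eq_true] at h
        rcases h with h1 | h1
        · rw [hb] at h1; simp at h1
        · exact h1
      simp only [pvB_loop, hb, Bool.not_true]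
      rw [if_neg (by simp)]
      exact ih _ h'
    · simp only [pvB_loop, Bool.not_eq_true] at hb ⊢
      rw [hb]
      simp

theorem pvB_loop_ok (depths : List Int) (n : Int) :
    ∀ (l : List (Int × Char)) (acc : Int),
      (∀ q ∈ l, ("OX|".toList.contains q.2) = true) →
      pvB_loop depths n l acc =
        some (l.foldl (fun s q => s + if q.2 = 'O' ∧ min q.1 (n - 1 - q.1) ∈ depths then 1 else 0) acc) := by
  intro l
  induction l with
  | nil => intro acc _; rfl
  | cons q rest ih =>
    intro acc h
    obtain ⟨i, u⟩ := q
    have hu : ("OX|".toList.contains u) = true := h (i, u) (by simp)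
    simp only [pvB_loop, hu, Bool.not_true, List.foldl_cons]
    rw [if_neg (by simp)]
    exact ih _ (fun q hq => h q (by simp [hq]))

theorem pv_mem_enum {cs : List Char} {q : Int × Char} (hq : q ∈ PySem.List.enumerate cs) :
    q.2 ∈ cs := by
  rw [PySem.List.mem_enumerate_iff] at hq
  obtain ⟨k, hk, rfl⟩ := hq
  simp

/-- Lookup misses for a preference outside {W, A, D} at length 6. -/
theorem pv_get6_none (p : String) (hW : ¬ p = "W") (hA : ¬ p = "A") (hD : ¬ p = "D") :
    pvB_depths.get? (6, p) = none := by
  have hmk : pvB_depths = PySem.Dict.mk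
    [ ((6, "W"), [0]),  ((6, "A"), [0, 2]),  ((6, "D"), [0, 2]),
      ((12, "W"), [0]), ((12, "M"), [1, 5]), ((12, "A"), [2, 4]), ((12, "D"), [2, 4]),
      ((8, "W"), [0]),  ((8, "A"), [1, 3]),  ((8, "D"), [1, 3]) ] := by decide
  rw [hmk]
  simp [PySem.Dict.get?, Ne.symm hW, Ne.symm hA, Ne.symm hD]

/-- Lookup misses for a preference outside {W, M, A, D} at length 12. -/
theorem pv_get12_none (p : String) (hW : ¬ p = "W") (hM : ¬ p = "M") (hA : ¬ p = "A") (hD : ¬ p = "D") :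
    pvB_depths.get? (12, p) = none := by
  have hmk : pvB_depths = PySem.Dict.mk
    [ ((6, "W"), [0]),  ((6, "A"), [0, 2]),  ((6, "D"), [0, 2]),
      ((12, "W"), [0]), ((12, "M"), [1, 5]), ((12, "A"), [2, 4]), ((12, "D"), [2, 4]),
      ((8, "W"), [0]),  ((8, "A"), [1, 3]),  ((8, "D"), [1, 3]) ] := by decide
  rw [hmk]
  simp [PySem.Dict.get?, Ne.symm hW, Ne.symm hM, Ne.symm hA, Ne.symm hD]

/-- Lookup misses for a preference outside {W, A, D} (or "M") at length 8. -/
theorem pv_get8_none (p : String) (hW : ¬ p = "W") (hA : ¬ p = "A") (hD : ¬ p = "D") :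
    pvB_depths.get? (8, p) = none := by
  have hmk : pvB_depths = PySem.Dict.mk
    [ ((6, "W"), [0]),  ((6, "A"), [0, 2]),  ((6, "D"), [0, 2]),
      ((12, "W"), [0]), ((12, "M"), [1, 5]), ((12, "A"), [2, 4]), ((12, "D"), [2, 4]),
      ((8, "W"), [0]),  ((8, "A"), [1, 3]),  ((8, "D"), [1, 3]) ] := by decide
  rw [hmk]
  simp [PySem.Dict.get?, Ne.symm hW, Ne.symm hA, Ne.symm hD]

theorem pv_contains_of_none {k : Int × String} (h : pvB_depths.get? k = none) :
    pvB_depths.contains k = false := by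
  rw [PySem.Dict.contains_eq_isSome_get?, h]
  rfl

/-- The n = 6 row with explicit characters. -/
theorem pv_len6 (t : Int) (p : String) (a b c d e f : Char)
    (hg : ∀ c' ∈ [a, b, c, d, e, f], ("OX|".toList.contains c') = true) :
    pvA_core t [a, b, c, d, e, f] p = pvB_core t [a, b, c, d, e, f] p := by
  have hb : pvA_badLoop [a, b, c, d, e, f] = false := by
    rw [pvA_badLoop_eq_any, List.any_eq_false]
    intro c hc
    have := hg c hc
    simp at this ⊢
    tauto
  have henum : ∀ q ∈ PySem.List.enumerate [a, b, c, d, e, f], ("OX|".toList.contains q.2) = true :=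
    fun q hq => hg _ (pv_mem_enum hq)
  simp only [pvA_core, pvB_core, hb]
  rw [pvB_loop_ok _ _ _ _ henum]
  by_cases hW : p = "W"
  · subst hW
    have hget : pvB_depths.get? ((6:Int), "W") = some [0] := by decide
    have hcon : pvB_depths.contains ((6:Int), "W") = true := by decide
    norm_num [hget, hcon, PySem.List.pyGet?, PySem.List.pyIdx?]
    by_cases ha : a = 'O' <;> by_cases hf : f = 'O' <;> simp [ha, hf]
  by_cases hM : p = "M"
  · subst hM
    have hget : pvB_depths.get? ((6:Int), "M") = none := by decide
    norm_num [hW, hget, pv_contains_of_none hget]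
  by_cases hA : p = "A"
  · subst hA
    have hget : pvB_depths.get? ((6:Int), "A") = some [0, 2] := by decide
    have hcon : pvB_depths.contains ((6:Int), "A") = true := by decide
    norm_num [hW, hM, hget, hcon, PySem.List.pyGet?, PySem.List.pyIdx?]
    by_cases ha : a = 'O' <;> by_cases hc : c = 'O' <;> by_cases hd : d = 'O' <;>
      by_cases hf : f = 'O' <;> simp [ha, hc, hd, hf]
  by_cases hD : p = "D"
  · subst hD
    have hget : pvB_depths.get? ((6:Int), "D") = some [0, 2] := by decide
    have hcon : pvB_depths.contains ((6:Int), "D") = true := by decide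
    norm_num [hW, hM, hA, hget, hcon, PySem.List.pyGet?, PySem.List.pyIdx?]
    by_cases ha : a = 'O' <;> by_cases hc : c = 'O' <;> by_cases hd : d = 'O' <;>
      by_cases hf : f = 'O' <;> simp [ha, hc, hd, hf]
  · have hget := pv_get6_none p hW hA hD
    norm_num [hW, hM, hA, hD, hget, pv_contains_of_none hget]

/-- The n = 12 row with explicit characters. -/
theorem pv_len12 (t : Int) (p : String) (a b c d e f g h i j k l : Char)
    (hg : ∀ c' ∈ [a, b, c, d, e, f, g, h, i, j, k, l], ("OX|".toList.contains c') = true) :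
    pvA_core t [a, b, c, d, e, f, g, h, i, j, k, l] p =
      pvB_core t [a, b, c, d, e, f, g, h, i, j, k, l] p := by
  have hb : pvA_badLoop [a, b, c, d, e, f, g, h, i, j, k, l] = false := by
    rw [pvA_badLoop_eq_any, List.any_eq_false]
    intro c hc
    have := hg c hc
    simp at this ⊢
    tauto
  have henum : ∀ q ∈ PySem.List.enumerate [a, b, c, d, e, f, g, h, i, j, k, l],
      ("OX|".toList.contains q.2) = true :=
    fun q hq => hg _ (pv_mem_enum hq)
  simp only [pvA_core, pvB_core, hb]
  rw [pvB_loop_ok _ _ _ _ henum]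
  by_cases hW : p = "W"
  · subst hW
    have hget : pvB_depths.get? ((12:Int), "W") = some [0] := by decide
    have hcon : pvB_depths.contains ((12:Int), "W") = true := by decide
    norm_num [hget, hcon, PySem.List.pyGet?, PySem.List.pyIdx?]
    by_cases ha : a = 'O' <;> by_cases hl : l = 'O' <;> simp [ha, hl]
  by_cases hM : p = "M"
  · subst hM
    have hget : pvB_depths.get? ((12:Int), "M") = some [1, 5] := by decide
    have hcon : pvB_depths.contains ((12:Int), "M") = true := by decide
    norm_num [hW, hget, hcon, PySem.List.pyGet?, PySem.List.pyIdx?]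
    by_cases hb' : b = 'O' <;> by_cases hf : f = 'O' <;> by_cases hgc : g = 'O' <;>
      by_cases hk : k = 'O' <;> simp [hb', hf, hgc, hk]
  by_cases hA : p = "A"
  · subst hA
    have hget : pvB_depths.get? ((12:Int), "A") = some [2, 4] := by decide
    have hcon : pvB_depths.contains ((12:Int), "A") = true := by decide
    norm_num [hW, hM, hget, hcon, PySem.List.pyGet?, PySem.List.pyIdx?]
    by_cases hc : c = 'O' <;> by_cases he : e = 'O' <;> by_cases hh : h = 'O' <;>
      by_cases hj : j = 'O' <;> simp [hc, he, hh, hj]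
  by_cases hD : p = "D"
  · subst hD
    have hget : pvB_depths.get? ((12:Int), "D") = some [2, 4] := by decide
    have hcon : pvB_depths.contains ((12:Int), "D") = true := by decide
    norm_num [hW, hM, hA, hget, hcon, PySem.List.pyGet?, PySem.List.pyIdx?]
    by_cases hc : c = 'O' <;> by_cases he : e = 'O' <;> by_cases hh : h = 'O' <;>
      by_cases hj : j = 'O' <;> simp [hc, he, hh, hj]
  · have hget := pv_get12_none p hW hM hA hD
    norm_num [hW, hM, hA, hD, hget, pv_contains_of_none hget]

/-- The n = 8 row with explicit characters; outside D_ in the window branch. -/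
theorem pv_len8 (t : Int) (p : String) (a b c d e f g h : Char)
    (hg : ∀ c' ∈ [a, b, c, d, e, f, g, h], ("OX|".toList.contains c') = true)
    (hdw : p = "W" → ¬ (1 ≤ t ∧ t ≤ (([a, h].count 'O' : Nat) : Int))) :
    pvA_core t [a, b, c, d, e, f, g, h] p = pvB_core t [a, b, c, d, e, f, g, h] p := by
  have hb : pvA_badLoop [a, b, c, d, e, f, g, h] = false := by
    rw [pvA_badLoop_eq_any, List.any_eq_false]
    intro c hc
    have := hg c hc
    simp at this ⊢
    tauto
  have henum : ∀ q ∈ PySem.List.enumerate [a, b, c, d, e, f, g, h],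
      ("OX|".toList.contains q.2) = true :=
    fun q hq => hg _ (pv_mem_enum hq)
  simp only [pvA_core, pvB_core, hb]
  rw [pvB_loop_ok _ _ _ _ henum]
  by_cases hW : p = "W"
  · subst hW
    have hdw' := hdw rfl
    have hget : pvB_depths.get? ((8:Int), "W") = some [0] := by decide
    have hcon : pvB_depths.contains ((8:Int), "W") = true := by decide
    have ha0 : ¬ a = '0' := by
      have := hg a (by simp); intro e; subst e; simp at this
    have hh0 : ¬ h = '0' := by
      have := hg h (by simp); intro e; subst e; simp at this
    norm_num [hget, hcon, ha0, hh0, PySem.List.pyGet?, PySem.List.pyIdx?]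
    by_cases ha : a = 'O' <;> by_cases hh : h = 'O' <;>
      simp [ha, hh] at hdw' ⊢ <;> split_ifs <;> first | rfl | omega
  by_cases hM : p = "M"
  · subst hM
    have hget : pvB_depths.get? ((8:Int), "M") = none := by decide
    norm_num [hW, hget, pv_contains_of_none hget]
  by_cases hA : p = "A"
  · subst hA
    have hget : pvB_depths.get? ((8:Int), "A") = some [1, 3] := by decide
    have hcon : pvB_depths.contains ((8:Int), "A") = true := by decide
    norm_num [hW, hM, hget, hcon, PySem.List.pyGet?, PySem.List.pyIdx?]
    by_cases hb' : b = 'O' <;> by_cases hd : d = 'O' <;> by_cases he : e = 'O' <;>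
      by_cases hgc : g = 'O' <;> simp [hb', hd, he, hgc]
  by_cases hD : p = "D"
  · subst hD
    have hget : pvB_depths.get? ((8:Int), "D") = some [1, 3] := by decide
    have hcon : pvB_depths.contains ((8:Int), "D") = true := by decide
    norm_num [hW, hM, hA, hget, hcon, PySem.List.pyGet?, PySem.List.pyIdx?]
    by_cases hb' : b = 'O' <;> by_cases hd : d = 'O' <;> by_cases he : e = 'O' <;>
      by_cases hgc : g = 'O' <;> simp [hb', hd, he, hgc]
  · have hget := pv_get8_none p hW hA hD
    norm_num [hW, hM, hA, hD, hget, pv_contains_of_none hget]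

theorem pv_exists6 (cs : List Char) (h : cs.length = 6) :
    ∃ a b c d e f, cs = [a, b, c, d, e, f] := by
  rcases cs with _ | ⟨a, _ | ⟨b, _ | ⟨c, _ | ⟨d, _ | ⟨e, _ | ⟨f, _ | ⟨g, tl⟩⟩⟩⟩⟩⟩⟩ <;>
    simp only [List.length_cons, List.length_nil] at h <;> try omega
  exact ⟨a, b, c, d, e, f, rfl⟩

theorem pv_exists8 (cs : List Char) (h : cs.length = 8) :
    ∃ a b c d e f g h', cs = [a, b, c, d, e, f, g, h'] := by
  rcases cs with _ | ⟨a, _ | ⟨b, _ | ⟨c, _ | ⟨d, _ | ⟨e, _ | ⟨f, _ | ⟨g, _ | ⟨h', _ | ⟨x, tl⟩⟩⟩⟩⟩⟩⟩⟩⟩ <;>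
    simp only [List.length_cons, List.length_nil] at h <;> try omega
  exact ⟨a, b, c, d, e, f, g, h', rfl⟩

theorem pv_exists12 (cs : List Char) (h : cs.length = 12) :
    ∃ a b c d e f g h' i j k l, cs = [a, b, c, d, e, f, g, h', i, j, k, l] := by
  rcases cs with _ | ⟨a, _ | ⟨b, _ | ⟨c, _ | ⟨d, _ | ⟨e, _ | ⟨f, _ | ⟨g, _ | ⟨h', _ | ⟨i, _ | ⟨j, _ | ⟨k, _ | ⟨l, _ | ⟨x, tl⟩⟩⟩⟩⟩⟩⟩⟩⟩⟩⟩⟩⟩ <;>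
    simp only [List.length_cons, List.length_nil] at h <;> try omega
  exact ⟨a, b, c, d, e, f, g, h', i, j, k, l, rfl⟩

theorem pv_main (total_avengers : Int) (cs : List Char) (preference : String)
    (hD : ¬ ((cs.all (fun c => c == 'O' || c == 'X' || c == '|')) = true ∧
             cs.length = 8 ∧ preference = "W" ∧
             1 ≤ total_avengers ∧
             total_avengers ≤ ((cs.take 1 ++ cs.drop 7).count 'O' : Int))) :
    pvA_core total_avengers cs preference = pvB_core total_avengers cs preference := by
  by_cases hbad : (cs.any fun c => !("OX|".toList.contains c)) = true
  · have hb : pvA_badLoop cs = true := by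
      rw [pvA_badLoop_eq_any]
      exact hbad
    have hbe : (PySem.List.enumerate cs).any (fun q => !("OX|".toList.contains q.2)) = true := by
      have hmap : (PySem.List.enumerate cs).map (·.2) = cs := PySem.List.map_snd_enumerate cs 0
      rw [List.any_eq_true] at hbad ⊢
      obtain ⟨c, hc, hcb⟩ := hbad
      rw [← hmap] at hc
      obtain ⟨q, hq, rfl⟩ := List.mem_map.mp hc
      exact ⟨q, hq, hcb⟩
    simp only [pvA_core, pvB_core, hb]
    rw [pvB_loop_bad _ _ _ _ hbe]
    simp
  · rw [Bool.not_eq_true, List.any_eq_false] at hbad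
    have hg : ∀ c ∈ cs, ("OX|".toList.contains c) = true := by
      intro c hc
      have := hbad c hc
      simp at this ⊢
      tauto
    by_cases h6 : cs.length = 6
    · obtain ⟨a, b, c, d, e, f, rfl⟩ := pv_exists6 cs h6
      exact pv_len6 total_avengers preference a b c d e f hg
    by_cases h12 : cs.length = 12
    · obtain ⟨a, b, c, d, e, f, g, h', i, j, k, l, rfl⟩ := pv_exists12 cs h12
      exact pv_len12 total_avengers preference a b c d e f g h' i j k l hg
    by_cases h8 : cs.length = 8
    · obtain ⟨a, b, c, d, e, f, g, h', rfl⟩ := pv_exists8 cs h8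
      refine pv_len8 total_avengers preference a b c d e f g h' hg ?_
      intro hpW hcnt
      apply hD
      refine ⟨?_, by simp, hpW, hcnt.1, ?_⟩
      · rw [List.all_eq_true]
        intro c' hc'
        have := hg c' hc'
        simp at this ⊢
        tauto
      · simpa using hcnt.2
    · have hb : pvA_badLoop cs = false := by
        rw [pvA_badLoop_eq_any, List.any_eq_false]
        intro c hc
        have := hg c hc
        simp at this ⊢
        tauto
      have henum : ∀ q ∈ PySem.List.enumerate cs, ("OX|".toList.contains q.2) = true :=
        fun q hq => hg _ (pv_mem_enum hq)
      simp only [pvA_core, pvB_core, hb]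
      rw [pvB_loop_ok _ _ _ _ henum]
      have hn : ¬(((cs.length : Int)) = 6 ∨ ((cs.length : Int)) = 12 ∨ ((cs.length : Int)) = 8) := by
        rintro (hx | hx | hx) <;> omega
      simp [h6, h12, h8, hn]

-- ===== VERDICT (by name: the statement is the Claim_ definition above) =====
theorem can_board_with_preference_spec : Claim_unchanged_can_board_with_preference := by
  intro t s p _ hD
  unfold D_can_board_with_preference at hD
  show pvA_core t s.toList p = pvB_core t s.toList p
  exact pv_main t s.toList p hD

set_option maxRecDepth 8192 in
theorem can_board_with_preference_changed : Claim_changed_can_board_with_preference := by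
  unfold Claim_changed_can_board_with_preference; decide

theorem can_board_with_preference_tight : Claim_exact_can_board_with_preference := by
  intro t s p _ hDp
  obtain ⟨hvalid, h8, hW, ht1, htc⟩ := hDp
  subst hW
  show pvA_core t s.toList "W" ≠ pvB_core t s.toList "W"
  obtain ⟨a, b, c, d, e, f, g, h', hcs⟩ := pv_exists8 s.toList h8
  rw [hcs] at hvalid htc ⊢
  have hg : ∀ c' ∈ [a, b, c, d, e, f, g, h'], ("OX|".toList.contains c') = true := by
    intro c' hc'
    have := List.all_eq_true.mp hvalid c' hc'
    simp at this ⊢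
    tauto
  have hb : pvA_badLoop [a, b, c, d, e, f, g, h'] = false := by
    rw [pvA_badLoop_eq_any, List.any_eq_false]
    intro c' hc'
    have := hg c' hc'
    simp at this ⊢
    tauto
  have henum : ∀ q ∈ PySem.List.enumerate [a, b, c, d, e, f, g, h'],
      ("OX|".toList.contains q.2) = true :=
    fun q hq => hg _ (pv_mem_enum hq)
  simp only [pvA_core, pvB_core, hb]
  rw [pvB_loop_ok _ _ _ _ henum]
  have hget : pvB_depths.get? ((8:Int), "W") = some [0] := by decide
  have hcon : pvB_depths.contains ((8:Int), "W") = true := by decide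
  have ha0 : ¬ a = '0' := by
    have := hg a (by simp); intro e; subst e; simp at this
  have hh0 : ¬ h' = '0' := by
    have := hg h' (by simp); intro e; subst e; simp at this
  simp only [List.take, List.drop, List.count_append] at htc
  norm_num [hget, hcon, ha0, hh0, PySem.List.pyGet?, PySem.List.pyIdx?]
  by_cases ha : a = 'O' <;> by_cases hh : h' = 'O' <;>
    simp [ha, hh] at htc ⊢ <;>
    first
      | omega
      | (split_ifs <;> first | omega | decide)
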